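-- pv_equiv track=rewrite | github.com/pipme/amortized-Bayesian-workflow | sbi_mcmc/tasks/tasks.py | _get_start_end_indices
-- ===== SOURCE A (Python) =====
-- from collections import OrderedDict
--
-- def _get_start_end_indices(var_dims: OrderedDict[str, int]):
--     indices = {}
--     start = 0
--     for var_name, var_dim in var_dims.items():
--         end = start + var_dim
--         indices[var_name] = (start, end)
--         start = end
--     return indices
-- ===== SOURCE B (Python) =====
-- def _get_start_end_indices(var_dims):
--     out = []
--     end = sum(var_dims.values())
--     for name, dim in reversed(list(var_dims.items())):
--         out.append((name, (end - dim, end)))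
--         end -= dim
--     return dict(reversed(out))
-- ===== Notes on version B (the rewrite author's own statement) =====
-- stated objective: alternative
-- what changed: Instead of A's forward loop with a running start, B precomputes the total with sum(), traverses the items in reverse emitting (end-dim, end) while subtracting, and reverses the collected pairs to build the dict back-to-front.
import Mathlib
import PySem

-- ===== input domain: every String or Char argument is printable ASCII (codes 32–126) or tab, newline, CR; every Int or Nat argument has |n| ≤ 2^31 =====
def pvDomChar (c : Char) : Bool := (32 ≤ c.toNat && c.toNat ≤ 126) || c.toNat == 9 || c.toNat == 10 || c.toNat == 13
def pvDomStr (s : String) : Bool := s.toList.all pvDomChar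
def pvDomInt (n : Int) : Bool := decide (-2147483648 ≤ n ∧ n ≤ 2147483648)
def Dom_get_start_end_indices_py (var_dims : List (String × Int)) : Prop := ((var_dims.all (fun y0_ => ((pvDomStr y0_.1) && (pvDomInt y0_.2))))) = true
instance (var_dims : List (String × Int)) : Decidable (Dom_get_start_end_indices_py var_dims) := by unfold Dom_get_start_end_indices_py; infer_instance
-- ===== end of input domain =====

-- B builds the table back-to-front: total via sum(), reverse traversal emitting
-- (end-dim, end) while subtracting, then reversing the pairs (objective: alternative).

-- ===== PORT A =====
-- the for-loop of A: state = (indices dict, start)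
def pvA_loop : List (String × Int) → PySem.Dict String (Int × Int) → Int → PySem.Dict String (Int × Int)
  | [], d, _ => d
  | (n, dim) :: t, d, s => pvA_loop t (d.insert n (s, s + dim)) (s + dim)

def get_start_end_indices_py (var_dims : List (String × Int)) : List (String × Int × Int) :=
  (pvA_loop var_dims PySem.Dict.empty 0).items

-- ===== PORT B =====
-- B's for-loop over reversed(items): state = (out list, end); appends (end-dim, end)
def pvB_loop : List (String × Int) → List (String × Int × Int) → Int → List (String × Int × Int)
  | [], out, _ => out
  | (n, dim) :: t, out, e => pvB_loop t (out ++ [(n, (e - dim, e))]) (e - dim)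

def get_start_end_indices_py_alt (var_dims : List (String × Int)) : List (String × Int × Int) :=
  let total := (var_dims.map (·.2)).foldl (· + ·) 0        -- sum(var_dims.values())
  let out := pvB_loop var_dims.reverse [] total
  -- dict(reversed(out)): repeated insert into an empty dict
  (out.reverse.foldl (fun d (p : String × Int × Int) => d.insert p.1 p.2)
    (PySem.Dict.empty : PySem.Dict String (Int × Int))).items

-- ===== PRECONDITION & SPEC =====
def Spec_get_start_end_indices_py (var_dims : List (String × Int)) (out : List (String × Int × Int)) : Prop := out = get_start_end_indices_py_alt var_dims
instance (var_dims : List (String × Int)) (out : List (String × Int × Int)) : Decidable (Spec_get_start_end_indices_py var_dims out) := by unfold Spec_get_start_end_indices_py; infer_instance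

-- ===== CLAIM (what is proved, stated in full; the proofs are below) =====
def Claim_equal_get_start_end_indices_py : Prop := ∀ (var_dims : List (String × Int)), Dom_get_start_end_indices_py var_dims → Spec_get_start_end_indices_py var_dims (get_start_end_indices_py var_dims)

-- ===== LEMMAS AND PROOFS =====

-- the sequence of (name, (start, end)) pairs A inserts, starting at offset s
def pvPairsA : List (String × Int) → Int → List (String × Int × Int)
  | [], _ => []
  | (n, dim) :: t, s => (n, (s, s + dim)) :: pvPairsA t (s + dim)

-- accumulator-free form of B's loop
def pvG : List (String × Int) → Int → List (String × Int × Int)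
  | [], _ => []
  | (n, dim) :: t, e => (n, (e - dim, e)) :: pvG t (e - dim)

def pvSumDims (l : List (String × Int)) : Int := (l.map (·.2)).sum

theorem pvA_loop_eq_foldl (l : List (String × Int)) (d : PySem.Dict String (Int × Int)) (s : Int) :
    pvA_loop l d s = (pvPairsA l s).foldl (fun d p => d.insert p.1 p.2) d := by
  induction l generalizing d s with
  | nil => rfl
  | cons h t ih => obtain ⟨n, dim⟩ := h; simp [pvA_loop, pvPairsA, ih]

theorem pvB_loop_eq_g (l : List (String × Int)) (out : List (String × Int × Int)) (e : Int) :
    pvB_loop l out e = out ++ pvG l e := by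
  induction l generalizing out e with
  | nil => simp [pvB_loop, pvG]
  | cons h t ih => obtain ⟨n, dim⟩ := h; simp [pvB_loop, pvG, ih]

theorem pvG_append (xs ys : List (String × Int)) (e : Int) :
    pvG (xs ++ ys) e = pvG xs e ++ pvG ys (e - pvSumDims xs) := by
  induction xs generalizing e with
  | nil => simp [pvG, pvSumDims]
  | cons h t ih =>
    obtain ⟨n, dim⟩ := h
    simp [pvG, ih, pvSumDims, List.sum_cons]
    rw [show e - dim - (t.map (·.2)).sum = e - (dim + (t.map (·.2)).sum) by omega]

theorem pvG_reverse (l : List (String × Int)) (s : Int) :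
    (pvG l.reverse (s + pvSumDims l)).reverse = pvPairsA l s := by
  induction l generalizing s with
  | nil => rfl
  | cons h t ih =>
    obtain ⟨n, dim⟩ := h
    have hsum : pvSumDims t.reverse = pvSumDims t := by
      simp [pvSumDims]
    rw [List.reverse_cons, pvG_append, hsum]
    have he : s + pvSumDims ((n, dim) :: t) - pvSumDims t = s + dim := by
      simp [pvSumDims, List.sum_cons]; omega
    have he2 : s + pvSumDims ((n, dim) :: t) = (s + dim) + pvSumDims t := by
      simp [pvSumDims, List.sum_cons]; omega
    rw [he, he2, List.reverse_append, ih (s + dim)]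
    simp [pvG, pvPairsA]

theorem pvFoldlAdd (l : List Int) (a : Int) : l.foldl (· + ·) a = a + l.sum := by
  induction l generalizing a with
  | nil => simp
  | cons h t ih => simp [List.foldl_cons, ih, List.sum_cons]; omega

-- ===== VERDICT (by name: the statement is the Claim_ definition above) =====
theorem get_start_end_indices_py_spec : Claim_equal_get_start_end_indices_py := by
  intro var_dims _
  unfold Spec_get_start_end_indices_py get_start_end_indices_py get_start_end_indices_py_alt
  dsimp only
  rw [pvA_loop_eq_foldl, pvB_loop_eq_g, pvFoldlAdd]
  simp only [List.nil_append, Int.zero_add]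
  have := pvG_reverse var_dims 0
  rw [show (0 : Int) + pvSumDims var_dims = pvSumDims var_dims by omega] at this
  rw [show pvSumDims var_dims = (var_dims.map (·.2)).sum from rfl] at this
  rw [this]
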